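-- pv_equiv track=rewrite | github.com/Suraksha-sachan/tathastu_week_of_code | day5/program1.py | suraksha
-- ===== SOURCE A (Python) =====
-- def suraksha(number):
--               result = 0
--               a = 1
--               if (number == 0):
--                            result += (5 * a)
--
--               while (number > 0):
--                            if (number % 10 == 0):
--                                          result += (5 * a)
--                            number //= 10
--                            a *= 10
--               return result
-- ===== SOURCE B (Python) =====
-- def suraksha(number):
--     if number < 0:
--         return 0
--     s = str(number)
--     result = 0
--     for i, ch in enumerate(s):
--         if ch == '0':
--             result += 5 * 10 ** (len(s) - 1 - i)
--     return result
-- ===== Notes on version B (the rewrite author's own statement) =====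
-- stated objective: idiomatic
-- what changed: B stringifies the number once and, for each zero character, adds five times its decimal place value, instead of A's divmod while-loop that extracts digits arithmetically while maintaining a running place value.
import Mathlib
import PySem

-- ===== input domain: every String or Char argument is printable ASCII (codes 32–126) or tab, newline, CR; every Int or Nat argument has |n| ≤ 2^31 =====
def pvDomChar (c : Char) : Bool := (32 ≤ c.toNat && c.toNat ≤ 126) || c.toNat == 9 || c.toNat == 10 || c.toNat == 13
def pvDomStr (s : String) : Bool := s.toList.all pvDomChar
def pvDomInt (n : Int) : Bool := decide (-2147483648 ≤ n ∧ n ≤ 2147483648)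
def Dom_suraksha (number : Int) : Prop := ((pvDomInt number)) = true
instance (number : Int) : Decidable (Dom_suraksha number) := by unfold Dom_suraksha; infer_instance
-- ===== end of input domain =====

-- B replaces A's divmod while-loop by an idiomatic pass over the decimal string str(number),
-- adding five times the decimal place value for each zero character.


-- ===== PORT A =====
-- the 'while number > 0' loop, carrying (result, a) exactly as A does
def surakshaLoop (number result a : Int) : Int :=
  if _h : number > 0 then
    surakshaLoop (PySem.Int.floordiv number 10)
      (if PySem.Int.mod number 10 = 0 then result + 5 * a else result)
      (a * 10)
  else result
termination_by number.toNat
decreasing_by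
  have h10 : PySem.Int.floordiv number 10 = number / 10 := by
    simp [PySem.Int.floordiv, Int.fdiv_eq_ediv_of_nonneg _ (by omega : (0:Int) ≤ (10:Int))]
  rw [h10]
  omega

-- result = 0; a = 1; if number == 0: result += 5 * a; then the while loop
def suraksha (number : Int) : Int :=
  surakshaLoop number (if number = 0 then 0 + 5 * 1 else 0) 1

-- ===== PORT B =====
-- the for loop: for i, ch in enumerate(s): if ch == '0': result += 5 * 10 ** (len(s) - 1 - i)
-- (Python's 10 ** e with e ≥ 0 — always the case here — is ported as (10:Int) ^ e.toNat, exact)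
def surakshaSum (s : String) : Int :=
  (PySem.List.enumerate s.toList 0).foldl
    (fun result ic =>
      if ic.2 = '0' then result + 5 * (10:Int) ^ (PySem.Str.len s - 1 - ic.1).toNat
      else result) 0

def suraksha_alt (number : Int) : Int :=
  if number < 0 then 0
  else surakshaSum (PySem.Int.toStr number)

-- ===== PRECONDITION & SPEC =====
def Spec_suraksha (number : Int) (out : Int) : Prop := out = suraksha_alt number
instance (number : Int) (out : Int) : Decidable (Spec_suraksha number out) := by unfold Spec_suraksha; infer_instance

-- ===== CLAIM (what is proved, stated in full; the proofs are below) =====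
def Claim_equal_suraksha : Prop := ∀ (number : Int), Dom_suraksha number → Spec_suraksha number (suraksha number)

-- ===== LEMMAS AND PROOFS =====

-- value of A's loop as a function of the base-10 digit list (little-endian)
def digSum : List Nat → Int
  | [] => 0
  | d :: ds => (if d = 0 then 5 else 0) + 10 * digSum ds

-- value of B's fold as a function of the character list (big-endian)
def chrSum : List Char → Int
  | [] => 0
  | c :: rest => (if c = '0' then 5 * (10:Int) ^ rest.length else 0) + chrSum rest

theorem surakshaLoop_eq (n : Nat) : ∀ (r a : Int),
    surakshaLoop (n : Int) r a = r + a * digSum (Nat.digits 10 n) := by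
  induction n using Nat.strong_induction_on with
  | _ n ih =>
    intro r a
    rcases Nat.eq_zero_or_pos n with h0 | hp
    · subst h0; rw [surakshaLoop]; simp [digSum]
    · rw [surakshaLoop]
      have hpos : ((n : Int) > 0) := by exact_mod_cast hp
      rw [dif_pos hpos]
      have hdiv : PySem.Int.floordiv (n : Int) 10 = ((n / 10 : Nat) : Int) := by
        simp [PySem.Int.floordiv,
          Int.fdiv_eq_ediv_of_nonneg _ (by omega : (0:Int) ≤ (10:Int))]
      have hmod : PySem.Int.mod (n : Int) 10 = ((n % 10 : Nat) : Int) := by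
        simp [PySem.Int.mod, Int.fmod_eq_emod_of_nonneg _ (by norm_num : (0:Int) ≤ 10)]
      rw [hdiv, hmod, ih (n / 10) (Nat.div_lt_self hp (by norm_num))]
      rw [Nat.digits_def' (by norm_num : 1 < 10) hp]
      simp only [digSum]
      by_cases hz : n % 10 = 0
      · simp only [hz, Nat.cast_zero]
        norm_num; ring
      · rw [if_neg (by exact_mod_cast hz), if_neg hz]
        ring

theorem chrSum_append (xs : List Char) (c : Char) :
    chrSum (xs ++ [c]) = 10 * chrSum xs + (if c = '0' then 5 else 0) := by
  induction xs with
  | nil => simp only [List.nil_append, chrSum, List.length_nil, pow_zero]; split <;> ring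
  | cons x xs ih =>
    simp only [List.cons_append, chrSum, ih, List.length_append, List.length_cons,
      List.length_nil, pow_succ]
    split <;> ring_nf

theorem chrSum_rev_digits (ds : List Nat) (h : ∀ d ∈ ds, d < 10) :
    chrSum (ds.reverse.map Nat.digitChar) = digSum ds := by
  induction ds with
  | nil => simp [chrSum, digSum]
  | cons d ds ih =>
    have hd : d < 10 := h d (by simp)
    simp only [List.reverse_cons, List.map_append, List.map_cons, List.map_nil]
    rw [chrSum_append, ih (fun x hx => h x (by simp [hx]))]
    have hch : (Nat.digitChar d = '0') = (d = 0) := by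
      interval_cases d <;> simp [Nat.digitChar]
    simp only [digSum, hch]
    ring

theorem toDigitsCore_eq (f : Nat) : ∀ (n : Nat) (acc : List Char), 0 < n → n < f →
    Nat.toDigitsCore 10 f n acc = (Nat.digits 10 n).reverse.map Nat.digitChar ++ acc := by
  induction f with
  | zero => intro n acc h1 h2; omega
  | succ f ih =>
    intro n acc h1 h2
    simp only [Nat.toDigitsCore]
    rw [Nat.digits_def' (by norm_num : 1 < 10) h1]
    by_cases hz : n / 10 = 0
    · rw [if_pos hz, hz]
      simp
    · rw [if_neg hz, ih (n / 10) _ (Nat.pos_of_ne_zero hz)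
        (lt_of_lt_of_le (Nat.div_lt_self h1 (by norm_num)) (by omega))]
      simp

theorem toChars_pos (m : Int) (h : 0 < m) :
    PySem.Int.toChars m = (Nat.digits 10 m.toNat).reverse.map Nat.digitChar := by
  rw [PySem.Int.toChars, if_neg (by omega), Nat.toDigits,
    toDigitsCore_eq (m.toNat + 1) m.toNat [] (by omega) (by omega)]
  simp

theorem fold_enum_eq (cs : List Char) : ∀ (k init L : Int), L = k + cs.length →
    (PySem.List.enumerate cs k).foldl
      (fun result ic =>
        if ic.2 = '0' then result + 5 * (10:Int) ^ (L - 1 - ic.1).toNat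
        else result) init = init + chrSum cs := by
  induction cs with
  | nil => intro k init L _; simp [PySem.List.enumerate, chrSum]
  | cons c rest ih =>
    intro k init L hL
    rw [PySem.List.enumerate]
    simp only [List.foldl_cons]
    rw [ih (k + 1) _ L (by simp at hL ⊢; omega)]
    have hexp : (L - 1 - k).toNat = rest.length := by
      simp at hL; omega
    simp only [chrSum, hexp]
    split <;> ring

theorem surakshaSum_eq (s : String) : surakshaSum s = chrSum s.toList := by
  rw [surakshaSum, fold_enum_eq s.toList 0 0 (PySem.Str.len s) (by simp [PySem.Str.len])]
  ring

-- ===== VERDICT (by name: the statement is the Claim_ definition above) =====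
theorem suraksha_spec : Claim_equal_suraksha := by
  intro number _
  show suraksha number = suraksha_alt number
  rcases lt_trichotomy number 0 with hneg | hzero | hpos
  · rw [suraksha_alt, if_pos hneg, suraksha, surakshaLoop, dif_neg (by omega),
      if_neg (by omega)]
  · subst hzero
    have h1 : suraksha 0 = 5 := by
      rw [suraksha, surakshaLoop, dif_neg (by omega)]; norm_num
    have h2 : suraksha_alt 0 = 5 := by decide
    rw [h1, h2]
  · have hn : ((number.toNat : Int)) = number := by omega
    rw [suraksha, if_neg (by omega), ← hn, surakshaLoop_eq number.toNat 0 1,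
      suraksha_alt, if_neg (by omega), surakshaSum_eq, PySem.Int.toList_toStr,
      toChars_pos _ (by omega),
      chrSum_rev_digits _ (fun d hd => Nat.digits_lt_base (by norm_num) hd),
      Int.toNat_natCast]
    ring
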